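-- pv_equiv track=rewrite | github.com/letiBri/Lab11 | model/model.py | contaNodi
-- ===== SOURCE A (Python) =====
-- def contaNodi(listaArchi):
--     res = []
--     for tupla in listaArchi:
--         res.append(tupla[0])
--         res.append(tupla[1])
--     insiemeStampare = set()
--     for i in range(0, len(res)):
--         for j in range(i+1, len(res)):
--             if res[i] == res[j]:
--                 insiemeStampare.add(res[i])
--     return insiemeStampare
-- ===== SOURCE B (Python) =====
-- def contaNodi(listaArchi):
--     counts = {}
--     for tupla in listaArchi:
--         for v in (tupla[0], tupla[1]):
--             counts[v] = counts.get(v, 0) + 1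
--     return {v for v, c in counts.items() if c > 1}
-- ===== Notes on version B (the rewrite author's own statement) =====
-- stated objective: faster
-- what changed: Replaces the O(n^2) all-pairs scan over the flattened endpoint list with a single counting pass over the edges using a dict, returning the keys whose count exceeds 1.
import Mathlib
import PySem

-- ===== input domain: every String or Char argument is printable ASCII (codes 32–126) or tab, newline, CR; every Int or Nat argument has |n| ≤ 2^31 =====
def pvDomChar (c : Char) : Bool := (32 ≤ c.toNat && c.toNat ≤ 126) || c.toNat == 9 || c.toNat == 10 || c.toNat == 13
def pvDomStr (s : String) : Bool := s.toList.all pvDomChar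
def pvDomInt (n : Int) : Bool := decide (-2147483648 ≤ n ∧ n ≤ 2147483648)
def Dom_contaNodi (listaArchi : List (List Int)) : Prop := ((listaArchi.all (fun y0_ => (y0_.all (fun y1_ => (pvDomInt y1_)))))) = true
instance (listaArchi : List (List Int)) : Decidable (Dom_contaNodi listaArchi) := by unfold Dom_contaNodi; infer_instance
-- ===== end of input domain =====

-- B replaces A's O(n^2) all-pairs scan over the flattened endpoint list by a single
-- counting pass with a dict, returning the keys counted more than once (faster).


-- ===== PORT A =====
def contaNodi (listaArchi : List (List Int)) : List Int :=
  let res : List Int := listaArchi.foldl (fun acc tupla =>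
    (acc ++ [PySem.List.pyGetD tupla 0 0]) ++ [PySem.List.pyGetD tupla 1 0]) []
  (PySem.List.pyRange 0 (PySem.List.len res) 1).foldl (fun insiemeStampare i =>
    (PySem.List.pyRange (i + 1) (PySem.List.len res) 1).foldl (fun insiemeStampare j =>
      if PySem.List.pyGetD res i 0 = PySem.List.pyGetD res j 0
      then PySem.Set.add insiemeStampare (PySem.List.pyGetD res i 0)
      else insiemeStampare) insiemeStampare)
    PySem.Set.empty

-- ===== PORT B =====
def contaNodi_alt (listaArchi : List (List Int)) : List Int :=
  let counts : PySem.Dict Int Int := listaArchi.foldl (fun d tupla =>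
    [PySem.List.pyGetD tupla 0 0, PySem.List.pyGetD tupla 1 0].foldl
      (fun d v => d.insert v (d.getD v 0 + 1)) d) PySem.Dict.empty
  PySem.Set.ofList ((counts.items.filter (fun p => 1 < p.2)).map (·.1))

-- ===== PRECONDITION & SPEC =====
-- Pre_ excludes exactly the inputs where Python A raises IndexError: an edge list with
-- fewer than two entries (tupla[0] / tupla[1]).
def Pre_contaNodi (listaArchi : List (List Int)) : Prop :=
  ∀ tupla ∈ listaArchi, 2 ≤ tupla.length
instance (listaArchi : List (List Int)) : Decidable (Pre_contaNodi listaArchi) := by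
  unfold Pre_contaNodi; infer_instance
def pvWitness_contaNodi : List (List Int) := [[1, 2], [2, 3]]
def Spec_contaNodi (listaArchi : List (List Int)) (out : List Int) : Prop := out = contaNodi_alt listaArchi
instance (listaArchi : List (List Int)) (out : List Int) : Decidable (Spec_contaNodi listaArchi out) := by unfold Spec_contaNodi; infer_instance

-- ===== CLAIM (what is proved, stated in full; the proofs are below) =====
def Claim_equal_contaNodi : Prop := ∀ (listaArchi : List (List Int)), Dom_contaNodi listaArchi → Pre_contaNodi listaArchi → Spec_contaNodi listaArchi (contaNodi listaArchi)

-- ===== LEMMAS AND PROOFS =====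

-- the flattened endpoint list both programs traverse
def pvFlat (listaArchi : List (List Int)) : List Int :=
  listaArchi.flatMap (fun tupla => [PySem.List.pyGetD tupla 0 0, PySem.List.pyGetD tupla 1 0])

-- structural image of A's outer loop: walk the list, adding every element that recurs later
def pvDupScan : List Int → List Int → List Int
  | s, [] => s
  | s, x :: t => pvDupScan (if x ∈ t then PySem.Set.add s x else s) t

-- the elements A's scan adds, in the order it first adds them
def pvMarkers : List Int → List Int
  | [] => []
  | x :: t => (if x ∈ t then [x] else []) ++ pvMarkers t

theorem pvInner (v : Int) (P : Int → Prop) [DecidablePred P] :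
    ∀ (J : List Int) (s : List Int),
      J.foldl (fun s j => if P j then PySem.Set.add s v else s) s
        = if ∃ j ∈ J, P j then PySem.Set.add s v else s := by
  intro J
  induction J with
  | nil => intro s; simp
  | cons j J ih =>
    intro s
    simp only [List.foldl_cons]
    by_cases hj : P j
    · rw [if_pos hj, ih]
      by_cases hJ : ∃ x ∈ J, P x
      · simp [hJ]
      · simp [hj, hJ]
    · rw [if_neg hj, ih]
      by_cases hJ : ∃ x ∈ J, P x <;> simp [hj, hJ]

theorem pvMemDrop (xs : List Int) (k : Nat) (hk : k < xs.length) :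
    (∃ j ∈ PySem.List.pyRange ((k : Int) + 1) (PySem.List.len xs) 1,
        PySem.List.pyGetD xs (k : Int) 0 = PySem.List.pyGetD xs j 0)
      ↔ xs[k] ∈ xs.drop (k + 1) := by
  rw [PySem.List.len_eq]
  constructor
  · rintro ⟨j, hj, hEq⟩
    rw [PySem.List.mem_pyRange_one] at hj
    have h0 : 0 ≤ j := by omega
    have h1 : j < (xs.length : Int) := hj.2
    rw [PySem.List.pyGetD_eq_getElem xs 0 (by omega) (by exact_mod_cast hk),
        PySem.List.pyGetD_eq_getElem xs 0 h0 h1] at hEq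
    have hjk : k + 1 ≤ j.toNat := by omega
    have hjl : j.toNat < xs.length := by omega
    rw [List.mem_iff_getElem]
    refine ⟨j.toNat - (k + 1), by rw [List.length_drop]; omega, ?_⟩
    have hidx : k + 1 + (j.toNat - (k + 1)) = j.toNat := by omega
    simp only [Int.toNat_natCast] at hEq
    rw [List.getElem_drop]
    simp only [hidx]
    exact hEq.symm
  · intro hmem
    rw [List.mem_iff_getElem] at hmem
    obtain ⟨m, hm, hEq⟩ := hmem
    rw [List.getElem_drop] at hEq
    have hm' : k + 1 + m < xs.length := by
      rw [List.length_drop] at hm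
      omega
    refine ⟨((k + 1 + m : Nat) : Int), ?_, ?_⟩
    · rw [PySem.List.mem_pyRange_one]
      constructor <;> push_cast <;> omega
    · rw [PySem.List.pyGetD_eq_getElem xs 0 (by omega) (by exact_mod_cast hk),
          PySem.List.pyGetD_eq_getElem xs 0 (by positivity) (by push_cast; omega)]
      simp only [Int.toNat_natCast]
      exact hEq.symm

theorem pvOuter (xs : List Int) :
    ∀ (n k : Nat) (s : List Int), xs.length ≤ k + n →
      (PySem.List.pyRange (k : Int) (PySem.List.len xs) 1).foldl
        (fun insiemeStampare i =>
          (PySem.List.pyRange (i + 1) (PySem.List.len xs) 1).foldl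
            (fun insiemeStampare j =>
              if PySem.List.pyGetD xs i 0 = PySem.List.pyGetD xs j 0
              then PySem.Set.add insiemeStampare (PySem.List.pyGetD xs i 0)
              else insiemeStampare) insiemeStampare) s
        = pvDupScan s (xs.drop k) := by
  intro n
  induction n with
  | zero =>
    intro k s h
    rw [PySem.List.len_eq, PySem.List.pyRange_one_eq_nil (by exact_mod_cast h)]
    rw [List.drop_eq_nil_of_le (by omega)]
    rfl
  | succ n ih =>
    intro k s h
    by_cases hk : xs.length ≤ k
    · rw [PySem.List.len_eq, PySem.List.pyRange_one_eq_nil (by exact_mod_cast hk)]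
      rw [List.drop_eq_nil_of_le (by omega)]
      rfl
    · have hk' : k < xs.length := by omega
      rw [PySem.List.len_eq, PySem.List.pyRange_one_cons (by exact_mod_cast hk')]
      rw [List.foldl_cons]
      rw [← PySem.List.len_eq]
      have hcast : ((k : Int) + 1) = ((k + 1 : Nat) : Int) := by push_cast; ring
      rw [show ((k : Int) + 1) = ((k + 1 : Nat) : Int) from hcast]
      rw [ih (k + 1) _ (by omega)]
      rw [List.drop_eq_getElem_cons hk']
      simp only [pvDupScan]
      congr 1
      rw [← hcast]
      rw [pvInner (PySem.List.pyGetD xs (k : Int) 0)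
            (fun j => PySem.List.pyGetD xs (k : Int) 0 = PySem.List.pyGetD xs j 0)]
      rw [if_congr (pvMemDrop xs k hk') rfl rfl]
      rw [PySem.List.pyGetD_eq_getElem xs 0 (by omega) (by exact_mod_cast hk')]
      simp only [Int.toNat_natCast]

theorem pvDupScan_eq_update :
    ∀ (t s : List Int), pvDupScan s t = PySem.Set.update s (pvMarkers t) := by
  intro t
  induction t with
  | nil => intro s; simp [pvDupScan, pvMarkers, PySem.Set.update_nil]
  | cons x t ih =>
    intro s
    by_cases hx : x ∈ t <;>
      simp [pvDupScan, pvMarkers, hx, ih, PySem.Set.update_cons]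

theorem pvMarkers_ofList :
    ∀ t : List Int, PySem.Set.ofList (pvMarkers t)
      = (PySem.Set.ofList t).filter (fun v => decide (1 < t.count v)) := by
  intro t
  induction t with
  | nil => rfl
  | cons x t ih =>
    have hdis : ∀ s : List Int, PySem.Set.discard s x = s.filter (fun y => !(y == x)) := by
      intro s; simp [PySem.Set.discard]
    by_cases hx : x ∈ t
    · have hcnt : decide (1 < (x :: t).count x) = true := by
        have h0 := List.count_pos_iff.mpr hx
        simp
        omega
      simp only [pvMarkers, hx, if_true, List.singleton_append]
      rw [PySem.Set.ofList_cons, ih, hdis, PySem.Set.ofList_cons, List.filter_cons, hcnt,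
        hdis, List.filter_filter, List.filter_filter]
      refine congrArg (List.cons x) (List.filter_congr ?_)
      intro v hv
      by_cases hvx : v = x
      · subst hvx; simp
      · have hxv : ¬ x = v := fun h => hvx h.symm
        simp [hxv, Bool.and_comm]
    · have hcnt : decide (1 < (x :: t).count x) = false := by
        simp [List.count_eq_zero_of_not_mem hx]
      simp only [pvMarkers, hx, if_false, List.nil_append]
      rw [ih, PySem.Set.ofList_cons, List.filter_cons, hcnt, hdis, List.filter_filter]
      refine List.filter_congr ?_
      intro v hv
      have hvt : v ∈ t := (PySem.Set.mem_ofList t v).mp hv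
      have hvx : ¬ v = x := fun h => hx (h ▸ hvt)
      have hxv : ¬ x = v := fun h => hvx h.symm
      simp [hvx, hxv, Bool.and_comm]

theorem pvResA (listaArchi : List (List Int)) :
    listaArchi.foldl (fun acc tupla =>
      (acc ++ [PySem.List.pyGetD tupla 0 0]) ++ [PySem.List.pyGetD tupla 1 0]) []
      = pvFlat listaArchi := by
  have hfn : (fun (acc : List Int) (tupla : List Int) =>
      (acc ++ [PySem.List.pyGetD tupla 0 0]) ++ [PySem.List.pyGetD tupla 1 0])
      = (fun acc tupla => acc ++ [PySem.List.pyGetD tupla 0 0, PySem.List.pyGetD tupla 1 0]) := by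
    funext acc tupla; simp
  rw [hfn, PySem.List.foldl_append_eq_flatMap, pvFlat, List.nil_append]

theorem pvCountsB (listaArchi : List (List Int)) :
    ∀ d : PySem.Dict Int Int,
      listaArchi.foldl (fun d tupla =>
        [PySem.List.pyGetD tupla 0 0, PySem.List.pyGetD tupla 1 0].foldl
          (fun d v => d.insert v (d.getD v 0 + 1)) d) d
      = (pvFlat listaArchi).foldl (fun d v => d.insert v (d.getD v 0 + 1)) d := by
  induction listaArchi with
  | nil => intro d; rfl
  | cons tupla l ih =>
    intro d
    rw [List.foldl_cons, ih, pvFlat, pvFlat, List.flatMap_cons, List.foldl_append]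

theorem pvAside (listaArchi : List (List Int)) :
    contaNodi listaArchi
      = (PySem.Set.ofList (pvFlat listaArchi)).filter
          (fun v => decide (1 < (pvFlat listaArchi).count v)) := by
  unfold contaNodi
  simp only []
  rw [pvResA]
  have h := pvOuter (pvFlat listaArchi) (pvFlat listaArchi).length 0 PySem.Set.empty (by omega)
  rw [Nat.cast_zero] at h
  rw [h, List.drop_zero]
  rw [pvDupScan_eq_update]
  show PySem.Set.update [] _ = _
  rw [show PySem.Set.update ([] : List Int) (pvMarkers (pvFlat listaArchi))
        = PySem.Set.ofList (pvMarkers (pvFlat listaArchi)) from rfl]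
  exact pvMarkers_ofList _

theorem pvBside (listaArchi : List (List Int)) :
    contaNodi_alt listaArchi
      = (PySem.Set.ofList (pvFlat listaArchi)).filter
          (fun v => decide (1 < (pvFlat listaArchi).count v)) := by
  unfold contaNodi_alt
  simp only []
  rw [pvCountsB, PySem.Dict.foldl_insert_getD_add_one_eq_counter,
      PySem.Dict.items_counter, List.filter_map, List.map_map]
  have h1 : ((fun p : Int × Int => decide (1 < p.2)) ∘ fun k => (k, (List.count k (pvFlat listaArchi) : Int)))
      = fun v => decide (1 < (pvFlat listaArchi).count v) := by
    funext v
    simp only [Function.comp_apply]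
    rw [decide_eq_decide]
    exact Nat.one_lt_cast
  rw [h1]
  have h2 : ((fun p : Int × Int => p.1) ∘ fun k => (k, (List.count k (pvFlat listaArchi) : Int))) = id := by
    funext v; rfl
  rw [h2, List.map_id]
  exact PySem.Set.ofList_eq_self_of_nodup _ ((PySem.Set.nodup_ofList _).filter _)

-- ===== VERDICT (by name: the statement is the Claim_ definition above) =====
theorem contaNodi_spec : Claim_equal_contaNodi := by
  intro listaArchi _ _
  unfold Spec_contaNodi
  rw [pvAside, pvBside]
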